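-- pv_equiv track=rewrite | github.com/Bonioszko/studia | ptsz/zadanie2/weryfikator.py | verify_sequences
-- ===== SOURCE A (Python) =====
-- def verify_sequences(sequences, n):
--     task_set = set()
--     for seq in sequences:
--         for task in seq:
--             if task in task_set:
--                 return False
--             task_set.add(task)
--     return len(task_set) == n
-- ===== SOURCE B (Python) =====
-- def verify_sequences(sequences, n):
--     tasks = sorted(t for seq in sequences for t in seq)
--     if len(tasks) != n:
--         return False
--     return all(a < b for a, b in zip(tasks, tasks[1:]))
-- ===== Notes on version B (the rewrite author's own statement) =====
-- stated objective: alternative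
-- what changed: Replaces the running-set membership test with early return by sorting the flattened task list once and detecting duplicates as an equal adjacent pair in the sorted order, with the total-count check done on the list length.
import Mathlib
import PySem

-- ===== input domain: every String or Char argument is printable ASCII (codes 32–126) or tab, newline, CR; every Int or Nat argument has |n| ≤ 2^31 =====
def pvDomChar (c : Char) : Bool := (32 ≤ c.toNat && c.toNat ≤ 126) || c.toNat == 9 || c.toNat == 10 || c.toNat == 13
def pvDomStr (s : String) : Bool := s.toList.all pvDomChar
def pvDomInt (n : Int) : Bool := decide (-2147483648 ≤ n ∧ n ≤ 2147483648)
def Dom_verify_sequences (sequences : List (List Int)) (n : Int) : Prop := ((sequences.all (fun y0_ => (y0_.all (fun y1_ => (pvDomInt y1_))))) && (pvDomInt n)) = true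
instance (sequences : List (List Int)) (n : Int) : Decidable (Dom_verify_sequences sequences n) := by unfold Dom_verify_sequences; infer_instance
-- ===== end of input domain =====

-- B sorts the flattened task list and detects duplicates as an equal adjacent pair,
-- instead of A's running set with per-element membership tests and early return. Objective: alternative.

-- ===== PORT A =====
-- inner 'for task in seq' loop: none = the early 'return False'
def vsInner (taskSet : PySem.Set Int) (seq : List Int) : Option (PySem.Set Int) :=
  match seq with
  | [] => some taskSet
  | task :: rest =>
      if PySem.Set.contains taskSet task then none
      else vsInner (PySem.Set.add taskSet task) rest

-- outer 'for seq in sequences' loop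
def vsOuter (taskSet : PySem.Set Int) (seqs : List (List Int)) : Option (PySem.Set Int) :=
  match seqs with
  | [] => some taskSet
  | seq :: rest =>
      match vsInner taskSet seq with
      | none => none
      | some ts => vsOuter ts rest

def verify_sequences (sequences : List (List Int)) (n : Int) : Bool :=
  match vsOuter PySem.Set.empty sequences with
  | none => false
  | some taskSet => decide (PySem.Set.len taskSet = n)

-- ===== PORT B =====
def verify_sequences_alt (sequences : List (List Int)) (n : Int) : Bool :=
  let tasks := PySem.List.sorted (sequences.flatMap (fun seq => seq)) (fun x => x) false
  if (tasks.length : Int) ≠ n then false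
  else (tasks.zip tasks.tail).all (fun p => decide (p.1 < p.2))

-- ===== PRECONDITION & SPEC =====
def Spec_verify_sequences (sequences : List (List Int)) (n : Int) (out : Bool) : Prop := out = verify_sequences_alt sequences n
instance (sequences : List (List Int)) (n : Int) (out : Bool) : Decidable (Spec_verify_sequences sequences n out) := by unfold Spec_verify_sequences; infer_instance

-- ===== CLAIM =====
def Claim_equal_verify_sequences : Prop := ∀ (sequences : List (List Int)) (n : Int), Dom_verify_sequences sequences n → Spec_verify_sequences sequences n (verify_sequences sequences n)

-- ===== LEMMAS AND PROOFS =====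

-- A's nested loops process exactly the flattened task list
theorem vsInner_append (a b : List Int) : ∀ s,
    vsInner s (a ++ b) = (vsInner s a).bind (fun t => vsInner t b) := by
  induction a with
  | nil => intro s; rfl
  | cons x xs ih =>
      intro s
      simp only [List.cons_append, vsInner]
      split <;> simp [ih]

theorem vsOuter_eq_vsInner_flatten (seqs : List (List Int)) : ∀ s,
    vsOuter s seqs = vsInner s (seqs.flatMap (fun seq => seq)) := by
  induction seqs with
  | nil => intro s; rfl
  | cons seq rest ih =>
      intro s
      simp only [vsOuter, List.flatMap_cons, vsInner_append]
      cases h : vsInner s seq <;> simp [ih]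

-- characterisation of the inner loop on a duplicate-free accumulator
theorem vsInner_char (l : List Int) : ∀ s : PySem.Set Int, s.Nodup →
    vsInner s l = if (s ++ l).Nodup then some (l.foldl PySem.Set.add s) else none := by
  induction l with
  | nil => intro s hs; simp [vsInner, hs]
  | cons x xs ih =>
      intro s hs
      simp only [vsInner]
      by_cases hx : x ∈ s
      · rw [if_pos (by simpa [PySem.Set.contains_iff] using hx)]
        rw [if_neg]
        intro hnd
        exact (List.nodup_append.mp hnd).2.2 x hx x List.mem_cons_self rfl
      · rw [if_neg (by simpa [PySem.Set.contains_iff] using hx)]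
        rw [ih (PySem.Set.add s x) (PySem.Set.nodup_add _ _ hs)]
        rw [PySem.Set.add_of_not_mem hx]
        have : s ++ x :: xs = (s ++ [x]) ++ xs := by simp
        rw [this]
        simp [List.foldl, PySem.Set.add_of_not_mem hx]

-- on a ≤-sorted list, strict inequality on every adjacent pair says exactly 'no duplicates'
theorem adj_lt_eq_nodup : ∀ l : List Int, l.Pairwise (· ≤ ·) →
    ((l.zip l.tail).all (fun p => decide (p.1 < p.2))) = decide l.Nodup
  | [], _ => by simp
  | [x], _ => by simp
  | x :: y :: l, h => by
      have hx := List.pairwise_cons.mp h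
      have ih := adj_lt_eq_nodup (y :: l) hx.2
      simp only [List.tail_cons, List.zip_cons_cons, List.all_cons] at ih ⊢
      rw [ih]
      by_cases hlt : x < y
      · have hxnot : x ∉ y :: l := by
          intro hm
          rcases List.mem_cons.mp hm with rfl | hm
          · exact absurd hlt (lt_irrefl x)
          · have := List.pairwise_cons.mp hx.2
            exact absurd (lt_of_lt_of_le hlt (this.1 x hm)) (lt_irrefl x)
        simp [hlt, List.nodup_cons, hxnot]
      · have hxy : x = y := le_antisymm (hx.1 y List.mem_cons_self) (le_of_not_gt hlt)
        simp [List.nodup_cons, hxy]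

-- A computes: false on a duplicate, otherwise the count test on the flattened list
theorem verify_sequences_char (sequences : List (List Int)) (n : Int) :
    verify_sequences sequences n =
      (if (sequences.flatMap (fun seq => seq)).Nodup
       then decide (((sequences.flatMap (fun seq => seq)).length : Int) = n) else false) := by
  unfold verify_sequences
  rw [vsOuter_eq_vsInner_flatten,
    vsInner_char (sequences.flatMap (fun seq => seq)) PySem.Set.empty List.nodup_nil]
  simp only [show (PySem.Set.empty : PySem.Set Int) = [] from rfl, List.nil_append]
  split_ifs with h
  · rw [show List.foldl PySem.Set.add ([] : PySem.Set Int) (sequences.flatMap (fun seq => seq))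
          = PySem.Set.ofList (sequences.flatMap (fun seq => seq)) from
        (PySem.Set.ofList_eq_foldl _).symm,
      PySem.Set.ofList_eq_self_of_nodup _ h]
    rfl
  · rfl

-- B computes: false on a count mismatch, otherwise the adjacent-pair duplicate test
theorem verify_sequences_alt_char (sequences : List (List Int)) (n : Int) :
    verify_sequences_alt sequences n =
      (if (((sequences.flatMap (fun seq => seq)).length : Int) = n)
       then decide (sequences.flatMap (fun seq => seq)).Nodup else false) := by
  unfold verify_sequences_alt
  show (if ((PySem.List.sorted (sequences.flatMap (fun seq => seq)) (fun x => x) false).length : Int) ≠ n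
        then false
        else ((PySem.List.sorted (sequences.flatMap (fun seq => seq)) (fun x => x) false).zip
              (PySem.List.sorted (sequences.flatMap (fun seq => seq)) (fun x => x) false).tail).all
              (fun p => decide (p.1 < p.2))) = _
  have hperm := PySem.List.sorted_perm (sequences.flatMap (fun seq => seq)) (fun x => x) false
  have hpw : (PySem.List.sorted (sequences.flatMap (fun seq => seq)) (fun x => x) false).Pairwise (· ≤ ·) := by
    simpa using PySem.List.sorted_pairwise (sequences.flatMap (fun seq => seq)) (fun x => x)
  rw [adj_lt_eq_nodup _ hpw]
  rw [hperm.length_eq]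
  simp only [decide_eq_decide.mpr hperm.nodup_iff]
  by_cases hn : (((sequences.flatMap (fun seq => seq)).length : Int) = n)
  · rw [if_neg (by simpa using hn), if_pos hn]
  · rw [if_pos (by simpa using hn), if_neg hn]

theorem verify_sequences_eq (sequences : List (List Int)) (n : Int) :
    verify_sequences sequences n = verify_sequences_alt sequences n := by
  rw [verify_sequences_char, verify_sequences_alt_char]
  by_cases hnd : (sequences.flatMap (fun seq => seq)).Nodup <;>
    by_cases hn : (((sequences.flatMap (fun seq => seq)).length : Int) = n)
  · rw [if_pos hnd, if_pos hn, decide_eq_decide]; exact iff_of_true hn hnd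
  · rw [if_pos hnd, if_neg hn]; exact decide_eq_false hn
  · rw [if_neg hnd, if_pos hn]; exact (decide_eq_false hnd).symm
  · rw [if_neg hnd, if_neg hn]

-- ===== VERDICT =====
theorem verify_sequences_spec : Claim_equal_verify_sequences := by
  intro sequences n _
  exact verify_sequences_eq sequences n
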